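-- pv_equiv track=rewrite | github.com/Vadskye/Rise | Stats Calculation/abilities.py | get_fundamental_progression_ability_names
-- ===== SOURCE A (Python) =====
-- def get_fundamental_progression_ability_names(name, level):
--     ability_names = list()
--     if name == 'barbarian':
--         ability_names += (
--             'barbarian damage reduction',
--             'rage',
--             'danger sense' if level >= 2 else None,
--             'larger than life' if level >= 7 else None,
--             'larger than belief' if level >= 17 else None,
--         )
--     elif name == 'fighter':
--         ability_names += (
--             'weapon discipline' if level >= 3 else None,
--             'improved weapon discipline' if level >=9 else None,
--         )
--     elif name == 'monk':
--         ability_names += (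
--             'unfettered defense',
--             'unarmed warrior',
--             'ki strike' if level >= 3 else None,
--             'still mind' if level >= 5 else None,
--             'bodily perfection' if level >= 7 else None,
--             'timeless' if level >= 15 else None,
--         )
--     elif name == 'paladin':
--         ability_names += (
--             'divine presence' if level >= 5 else None,
--         )
--     elif name == 'ranger':
--         ability_names += (
--             'quarry',
--             'improved combat style' if level >= 6 else None,
--         )
--     elif name == 'rogue':
--         ability_names += (
--             'sneak attack',
--         )
--     elif name == 'ideal':
--         ability_names += (
--             'ideal',
--         )
--     return [name for name in ability_names if name is not None]
-- ===== SOURCE B (Python) =====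
-- # For every class the level thresholds are monotonically increasing, so the
-- # gated abilities available at a given level are exactly a PREFIX of the gated
-- # list.  B binary-searches the threshold array for the prefix length and
-- # slices, instead of testing each entry: base + gated[:k].
-- _PROGRESSION = {
--     'barbarian': (['barbarian damage reduction', 'rage'],
--                   [2, 7, 17],
--                   ['danger sense', 'larger than life', 'larger than belief']),
--     'fighter': ([], [3, 9], ['weapon discipline', 'improved weapon discipline']),
--     'monk': (['unfettered defense', 'unarmed warrior'],
--              [3, 5, 7, 15],
--              ['ki strike', 'still mind', 'bodily perfection', 'timeless']),
--     'paladin': ([], [5], ['divine presence']),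
--     'ranger': (['quarry'], [6], ['improved combat style']),
--     'rogue': (['sneak attack'], [], []),
--     'ideal': (['ideal'], [], []),
-- }
--
-- def get_fundamental_progression_ability_names(name, level):
--     base, thresholds, gated = _PROGRESSION.get(name, ([], [], []))
--     lo, hi = 0, len(thresholds)
--     while lo < hi:
--         mid = (lo + hi) // 2
--         if thresholds[mid] <= level:
--             lo = mid + 1
--         else:
--             hi = mid
--     return base + gated[:lo]
-- ===== Notes on version B (the rewrite author's own statement) =====
-- stated objective: alternative
-- what changed: Exploits that each class's level thresholds are monotonically increasing: B stores per class a base list, a sorted threshold array and the gated-ability list, binary-searches the thresholds for the prefix length k, and returns base + gated[:k] - no per-entry level test or None filtering as in A's if/elif chain.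
import Mathlib
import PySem

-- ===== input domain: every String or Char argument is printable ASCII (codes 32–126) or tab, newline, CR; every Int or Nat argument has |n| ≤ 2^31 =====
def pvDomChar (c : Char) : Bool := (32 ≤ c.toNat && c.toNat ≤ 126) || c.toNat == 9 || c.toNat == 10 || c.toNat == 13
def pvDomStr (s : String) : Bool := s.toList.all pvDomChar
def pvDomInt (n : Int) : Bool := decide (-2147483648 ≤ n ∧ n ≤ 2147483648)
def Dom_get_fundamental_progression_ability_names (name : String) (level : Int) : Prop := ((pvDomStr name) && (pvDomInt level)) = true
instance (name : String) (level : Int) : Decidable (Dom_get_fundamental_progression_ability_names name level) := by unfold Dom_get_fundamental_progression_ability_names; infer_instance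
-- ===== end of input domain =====

-- B exploits that each class's thresholds are increasing: binary search for the
-- granted-prefix length, then base ++ gated.take k — no per-entry test/filter as in A.

-- ===== PORT A =====
-- literal transliteration: build a List (Option String) per branch, then keep the non-None entries
def get_fundamental_progression_ability_names (name : String) (level : Int) : List String :=
  let ability_names : List (Option String) :=
    if name == "barbarian" then
      [some "barbarian damage reduction",
       some "rage",
       if level ≥ 2 then some "danger sense" else none,
       if level ≥ 7 then some "larger than life" else none,
       if level ≥ 17 then some "larger than belief" else none]
    else if name == "fighter" then
      [if level ≥ 3 then some "weapon discipline" else none,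
       if level ≥ 9 then some "improved weapon discipline" else none]
    else if name == "monk" then
      [some "unfettered defense",
       some "unarmed warrior",
       if level ≥ 3 then some "ki strike" else none,
       if level ≥ 5 then some "still mind" else none,
       if level ≥ 7 then some "bodily perfection" else none,
       if level ≥ 15 then some "timeless" else none]
    else if name == "paladin" then
      [if level ≥ 5 then some "divine presence" else none]
    else if name == "ranger" then
      [some "quarry",
       if level ≥ 6 then some "improved combat style" else none]
    else if name == "rogue" then
      [some "sneak attack"]
    else if name == "ideal" then
      [some "ideal"]
    else []
  ability_names.filterMap id

-- ===== PORT B =====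
-- the table: class name → (base abilities, increasing thresholds, gated abilities)
def pvProgression : PySem.Dict String (List String × List Int × List String) :=
  PySem.Dict.ofList
    [("barbarian", (["barbarian damage reduction", "rage"],
        [2, 7, 17],
        ["danger sense", "larger than life", "larger than belief"])),
     ("fighter", ([], [3, 9], ["weapon discipline", "improved weapon discipline"])),
     ("monk", (["unfettered defense", "unarmed warrior"],
        [3, 5, 7, 15],
        ["ki strike", "still mind", "bodily perfection", "timeless"])),
     ("paladin", ([], [5], ["divine presence"])),
     ("ranger", (["quarry"], [6], ["improved combat style"])),
     ("rogue", (["sneak attack"], [], [])),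
     ("ideal", (["ideal"], [], []))]

-- Source B's while-loop binary search; thresholds[mid] is always in range (0 ≤ lo ≤ mid < hi ≤ len)
def pvBisect (ts : List Int) (level : Int) (lo hi : Nat) : Nat :=
  if _h : lo < hi then
    let mid := (lo + hi) / 2
    if ts.getD mid 0 ≤ level then pvBisect ts level (mid + 1) hi
    else pvBisect ts level lo mid
  else lo
termination_by hi - lo
decreasing_by all_goals omega

def get_fundamental_progression_ability_names_alt (name : String) (level : Int) : List String :=
  let (base, thresholds, gated) := PySem.Dict.getD pvProgression name ([], [], [])
  let k := pvBisect thresholds level 0 thresholds.length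
  -- gated[:k] with k : Nat is exactly List.take k (nonnegative upper slice bound)
  base ++ gated.take k

-- ===== PRECONDITION & SPEC =====
def Spec_get_fundamental_progression_ability_names (name : String) (level : Int) (out : List String) : Prop := out = get_fundamental_progression_ability_names_alt name level
instance (name : String) (level : Int) (out : List String) : Decidable (Spec_get_fundamental_progression_ability_names name level out) := by unfold Spec_get_fundamental_progression_ability_names; infer_instance

-- ===== CLAIM (what is proved, stated in full; the proofs are below) =====
def Claim_equal_get_fundamental_progression_ability_names : Prop := ∀ (name : String) (level : Int), Dom_get_fundamental_progression_ability_names name level → Spec_get_fundamental_progression_ability_names name level (get_fundamental_progression_ability_names name level)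

-- ===== LEMMAS AND PROOFS =====

-- ===== VERDICT (by name: the statement is the Claim_ definition above) =====
theorem get_fundamental_progression_ability_names_spec : Claim_equal_get_fundamental_progression_ability_names := by
  intro name level _
  unfold Spec_get_fundamental_progression_ability_names get_fundamental_progression_ability_names get_fundamental_progression_ability_names_alt
  by_cases h1 : name = "barbarian"
  · subst h1
    have ht : PySem.Dict.getD pvProgression "barbarian" ([], [], []) =
        (["barbarian damage reduction", "rage"], [2, 7, 17],
         ["danger sense", "larger than life", "larger than belief"]) := by decide
    rw [ht]
    by_cases l2 : (2:Int) ≤ level <;> by_cases l7 : (7:Int) ≤ level <;> by_cases l17 : (17:Int) ≤ level <;>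
      first
        | (exfalso; omega)
        | simp [pvBisect, List.filterMap, l2, l7, l17]
  by_cases h2 : name = "fighter"
  · subst h2
    have ht : PySem.Dict.getD pvProgression "fighter" ([], [], []) =
        ([], [3, 9], ["weapon discipline", "improved weapon discipline"]) := by decide
    rw [ht]
    by_cases l3 : (3:Int) ≤ level <;> by_cases l9 : (9:Int) ≤ level <;>
      first
        | (exfalso; omega)
        | simp [pvBisect, List.filterMap, l3, l9]
  by_cases h3 : name = "monk"
  · subst h3
    have ht : PySem.Dict.getD pvProgression "monk" ([], [], []) =
        (["unfettered defense", "unarmed warrior"], [3, 5, 7, 15],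
         ["ki strike", "still mind", "bodily perfection", "timeless"]) := by decide
    rw [ht]
    by_cases l3 : (3:Int) ≤ level <;> by_cases l5 : (5:Int) ≤ level <;> by_cases l7 : (7:Int) ≤ level <;>
      by_cases l15 : (15:Int) ≤ level <;>
      first
        | (exfalso; omega)
        | simp [pvBisect, List.filterMap, l3, l5, l7, l15]
  by_cases h4 : name = "paladin"
  · subst h4
    have ht : PySem.Dict.getD pvProgression "paladin" ([], [], []) =
        ([], [5], ["divine presence"]) := by decide
    rw [ht]
    by_cases l5 : (5:Int) ≤ level <;> simp [pvBisect, List.filterMap, l5]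
  by_cases h5 : name = "ranger"
  · subst h5
    have ht : PySem.Dict.getD pvProgression "ranger" ([], [], []) =
        (["quarry"], [6], ["improved combat style"]) := by decide
    rw [ht]
    by_cases l6 : (6:Int) ≤ level <;> simp [pvBisect, List.filterMap, l6]
  by_cases h6 : name = "rogue"
  · subst h6
    have ht : PySem.Dict.getD pvProgression "rogue" ([], [], []) =
        (["sneak attack"], [], []) := by decide
    rw [ht]
    simp [pvBisect, List.filterMap]
  by_cases h7 : name = "ideal"
  · subst h7
    have ht : PySem.Dict.getD pvProgression "ideal" ([], [], []) = (["ideal"], [], []) := by decide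
    rw [ht]
    simp [pvBisect, List.filterMap]
  · have ht : PySem.Dict.getD pvProgression name ([], [], []) = ([], [], []) := by
      have hitems : pvProgression.items =
          [("barbarian", (["barbarian damage reduction", "rage"], [2, 7, 17],
              ["danger sense", "larger than life", "larger than belief"])),
           ("fighter", ([], [3, 9], ["weapon discipline", "improved weapon discipline"])),
           ("monk", (["unfettered defense", "unarmed warrior"], [3, 5, 7, 15],
              ["ki strike", "still mind", "bodily perfection", "timeless"])),
           ("paladin", ([], [5], ["divine presence"])),
           ("ranger", (["quarry"], [6], ["improved combat style"])),
           ("rogue", (["sneak attack"], [], [])),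
           ("ideal", (["ideal"], [], []))] := by decide
      have b1 : ("barbarian" == name) = false := by simp; exact Ne.symm h1
      have b2 : ("fighter" == name) = false := by simp; exact Ne.symm h2
      have b3 : ("monk" == name) = false := by simp; exact Ne.symm h3
      have b4 : ("paladin" == name) = false := by simp; exact Ne.symm h4
      have b5 : ("ranger" == name) = false := by simp; exact Ne.symm h5
      have b6 : ("rogue" == name) = false := by simp; exact Ne.symm h6
      have b7 : ("ideal" == name) = false := by simp; exact Ne.symm h7
      simp [PySem.Dict.getD, PySem.Dict.get?, hitems, List.find?, b1, b2, b3, b4, b5, b6, b7]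
    rw [ht]
    simp [pvBisect, h1, h2, h3, h4, h5, h6, h7]
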